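-- pv_equiv track=rewrite | github.com/chiechie/BasicAlgo | find_substring.py | find_not_sucessive_substring
-- ===== SOURCE A (Python) =====
-- def find_not_sucessive_substring(a):
--     if len(a) == 1:
--         return ["", a]
--     len_a = len(a)
--     halv = len_a // 2
--     left = find_not_sucessive_substring(a[:halv])
--     right =  find_not_sucessive_substring(a[halv:])
--     merge = [l + r for l in left
--                         for r in right]
--     return merge
-- ===== SOURCE B (Python) =====
-- def find_not_sucessive_substring(a):
--     result = [""]
--     for c in a:
--         result = [r + s for r in result for s in ["", c]]
--     return result
-- ===== Notes on version B (the rewrite author's own statement) =====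
-- stated objective: simpler
-- what changed: Replaced the divide-and-conquer half-splitting recursion by a single iterative left fold that extends each accumulated prefix with '' or the next character, producing the same powerset concatenations in the same order.
-- outside the precondition, e.g. on find_not_sucessive_substring(''): A raises RecursionError, B returns ['']
import Mathlib
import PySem

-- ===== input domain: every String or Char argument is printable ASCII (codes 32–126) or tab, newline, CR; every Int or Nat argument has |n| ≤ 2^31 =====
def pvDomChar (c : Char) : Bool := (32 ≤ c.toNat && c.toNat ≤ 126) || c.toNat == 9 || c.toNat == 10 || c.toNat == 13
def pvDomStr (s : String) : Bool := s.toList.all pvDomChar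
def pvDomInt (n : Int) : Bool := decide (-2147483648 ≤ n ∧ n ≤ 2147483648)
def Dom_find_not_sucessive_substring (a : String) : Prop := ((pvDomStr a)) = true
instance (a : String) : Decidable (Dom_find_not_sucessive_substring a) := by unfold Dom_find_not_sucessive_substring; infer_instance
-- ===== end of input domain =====

-- B replaces A's divide-and-conquer recursion by one iterative left fold (same values, same order); not faster, simpler.
-- Strings are modelled by their char lists (PySem.Chars style): both ports compute on List Char and wrap with String.ofList.

-- ===== PORT A =====
-- Literal transliteration of A on the char list of `a`; fuel bounds the recursion depth
-- (fuel = length suffices whenever length ≥ 1; on "" Python A recurses forever, excluded by Pre_).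
-- a[:halv] / a[halv:] with 0 ≤ halv ≤ len are exactly take/drop; len(a)//2 on a Nat is Nat division.
def fsnsAuxA : Nat → List Char → List (List Char)
  | 0, _ => []
  | fuel+1, a =>
    if a.length = 1 then [[], a]
    else
      let len_a := a.length
      let halv := len_a / 2
      let left := fsnsAuxA fuel (a.take halv)
      let right := fsnsAuxA fuel (a.drop halv)
      left.flatMap (fun l => right.map (fun r => l ++ r))

def find_not_sucessive_substring (a : String) : List String :=
  (fsnsAuxA a.toList.length a.toList).map String.ofList

-- ===== PORT B =====
-- Source B: result = [""]; for c in a: result = [r + s for r in result for s in ["", c]]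
def fsnsStep (res : List (List Char)) (c : Char) : List (List Char) :=
  res.flatMap (fun r => [[], [c]].map (fun s => r ++ s))

def find_not_sucessive_substring_alt (a : String) : List String :=
  (a.toList.foldl fsnsStep [[]]).map String.ofList

-- ===== PRECONDITION & SPEC =====
-- Pre_ excludes only the empty string, on which Python A recurses without bound (RecursionError).
def Pre_find_not_sucessive_substring (a : String) : Prop := a ≠ ""
instance (a : String) : Decidable (Pre_find_not_sucessive_substring a) := by unfold Pre_find_not_sucessive_substring; infer_instance
def pvWitness_find_not_sucessive_substring : String := "ab"

def Spec_find_not_sucessive_substring (a : String) (out : List String) : Prop := out = find_not_sucessive_substring_alt a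
instance (a : String) (out : List String) : Decidable (Spec_find_not_sucessive_substring a out) := by unfold Spec_find_not_sucessive_substring; infer_instance

-- ===== CLAIM (what is proved, stated in full; the proofs are below) =====
def Claim_equal_find_not_sucessive_substring : Prop := ∀ (a : String), Dom_find_not_sucessive_substring a → Pre_find_not_sucessive_substring a → Spec_find_not_sucessive_substring a (find_not_sucessive_substring a)

-- ===== LEMMAS AND PROOFS =====

-- F is B's fold from the initial state [""]
def fsnsF (l : List Char) : List (List Char) := l.foldl fsnsStep [[]]

-- the fold from an arbitrary state L is the fold from [""] prefixed by each element of L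
theorem fsns_distrib (y : List Char) : ∀ (L : List (List Char)),
    y.foldl fsnsStep L = L.flatMap (fun p => (fsnsF y).map (p ++ ·)) := by
  induction y with
  | nil => intro L; simp [fsnsF, List.flatMap_singleton']
  | cons c ys ih =>
    intro L
    have hF : fsnsF (c :: ys) = fsnsF ys ++ (fsnsF ys).map (fun q => c :: q) := by
      simp only [fsnsF, List.foldl_cons]
      rw [ih]
      simp [fsnsStep, List.flatMap, fsnsF]
    simp only [List.foldl_cons]
    rw [ih, hF]
    simp [fsnsStep, List.flatMap, List.map_map, Function.comp_def]
    induction L with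
    | nil => simp
    | cons h t iht => simp [iht, List.append_assoc]

theorem fsnsF_append (x y : List Char) :
    fsnsF (x ++ y) = (fsnsF x).flatMap (fun p => (fsnsF y).map (p ++ ·)) := by
  simp only [fsnsF, List.foldl_append]
  exact fsns_distrib y (fsnsF x)

theorem fsnsAuxA_eq (fuel : Nat) : ∀ (l : List Char), l ≠ [] → l.length ≤ fuel →
    fsnsAuxA fuel l = fsnsF l := by
  induction fuel with
  | zero =>
    intro l hne hlen
    cases l with
    | nil => exact absurd rfl hne
    | cons c t => simp at hlen
  | succ fuel ih =>
    intro l hne hlen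
    by_cases h1 : l.length = 1
    · obtain ⟨c, rfl⟩ := List.length_eq_one_iff.mp h1
      simp [fsnsAuxA, fsnsF, fsnsStep, List.flatMap]
    · have h2 : 2 ≤ l.length := by
        rcases l with _ | ⟨c, t⟩
        · exact absurd rfl hne
        · simp only [List.length_cons] at h1 ⊢; omega
      have hhalv : 1 ≤ l.length / 2 ∧ l.length / 2 < l.length := by omega
      have htake : (l.take (l.length / 2)).length = l.length / 2 := by
        simp [List.length_take]; omega
      have hdrop : (l.drop (l.length / 2)).length = l.length - l.length / 2 := by
        simp [List.length_drop]
      have hL := ih (l.take (l.length / 2))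
        (by intro h; rw [h] at htake; simp at htake; omega)
        (by omega)
      have hR := ih (l.drop (l.length / 2))
        (by intro h; rw [h] at hdrop; simp at hdrop; omega)
        (by omega)
      simp only [fsnsAuxA, if_neg h1]
      rw [hL, hR, ← fsnsF_append, List.take_append_drop]

-- ===== VERDICT (by name: the statement is the Claim_ definition above) =====
theorem find_not_sucessive_substring_spec : Claim_equal_find_not_sucessive_substring := by
  intro a _ hpre
  unfold Spec_find_not_sucessive_substring find_not_sucessive_substring find_not_sucessive_substring_alt
  have hne : a.toList ≠ [] := by
    intro h
    apply hpre
    have : a.toList = ("" : String).toList := by simpa using h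
    exact String.toList_injective this
  rw [fsnsAuxA_eq a.toList.length a.toList hne le_rfl]
  rfl
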